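-- pv_equiv track=rewrite | github.com/sirrRohitjain/Sales_Agent | services/extractor.py | merge_extracted
-- ===== SOURCE A (Python) =====
-- TRACKED_FIELDS = ["consent_given", "best_call_time"]
--
-- def merge_extracted(existing: dict, new_data: dict) -> dict:
--     merged = dict(existing)
--     for key, value in new_data.items():
--         if key not in TRACKED_FIELDS:
--             continue  # silently ignore income, employment, spending etc.
--         if value is not None and value != "":
--             merged[key] = value
--     return merged
-- ===== SOURCE B (Python) =====
-- TRACKED_FIELDS = ["consent_given", "best_call_time"]
--
-- def _keep(k, v):
--     return k in TRACKED_FIELDS and v is not None and v != ""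
--
-- def merge_extracted(existing: dict, new_data: dict) -> dict:
--     # Positional construction instead of mutating an overlay dict:
--     # rewrite each existing entry in place via a lookup into new_data,
--     # then append the tracked non-empty new entries whose key is new.
--     updated = [(k, new_data[k]) if k in new_data and _keep(k, new_data[k]) else (k, v)
--                for k, v in existing.items()]
--     appended = [(k, v) for k, v in new_data.items()
--                 if _keep(k, v) and k not in existing]
--     return dict(updated + appended)
-- ===== Notes on version B (the rewrite author's own statement) =====
-- stated objective: alternative
-- what changed: Instead of A's stateful overlay (copy existing into a dict, then scan new_data mutating it), B constructs the result positionally with no intermediate mutable dict: it rewrites each existing entry in place by looking its key up in new_data, and separately appends the tracked non-empty entries whose key is new.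
import Mathlib
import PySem

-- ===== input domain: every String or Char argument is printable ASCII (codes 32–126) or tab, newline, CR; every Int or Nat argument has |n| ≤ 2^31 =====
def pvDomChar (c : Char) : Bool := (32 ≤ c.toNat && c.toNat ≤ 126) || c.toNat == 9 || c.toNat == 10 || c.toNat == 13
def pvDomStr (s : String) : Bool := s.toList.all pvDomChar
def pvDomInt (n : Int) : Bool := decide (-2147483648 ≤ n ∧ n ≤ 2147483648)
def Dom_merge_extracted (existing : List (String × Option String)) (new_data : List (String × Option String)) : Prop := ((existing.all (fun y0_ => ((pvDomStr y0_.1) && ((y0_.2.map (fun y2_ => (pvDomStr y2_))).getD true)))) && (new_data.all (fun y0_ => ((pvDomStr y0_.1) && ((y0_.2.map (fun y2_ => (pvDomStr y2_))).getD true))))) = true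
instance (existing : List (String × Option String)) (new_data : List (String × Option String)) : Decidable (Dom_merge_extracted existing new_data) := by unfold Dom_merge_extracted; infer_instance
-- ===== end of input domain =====

-- B builds the result positionally (rewrite each existing entry in place via a lookup into new_data, then append the fresh tracked entries) instead of A's mutating overlay loop; objective: alternative.

-- ===== PORT A =====
def TRACKED_FIELDS : List String := ["consent_given", "best_call_time"]

-- literal port of A: merged = dict(existing); for key, value in new_data.items(): guards; merged[key] = value
def merge_extracted (existing : List (String × Option String)) (new_data : List (String × Option String)) : List (String × Option String) :=
  (new_data.foldl (fun merged kv =>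
    if kv.1 ∉ TRACKED_FIELDS then merged          -- continue
    else if kv.2 ≠ none ∧ kv.2 ≠ some "" then merged.insert kv.1 kv.2
    else merged) (PySem.Dict.ofList existing)).items

-- ===== PORT B =====
-- _keep(k, v) of Source B
def pvKeep (k : String) (v : Option String) : Bool :=
  decide (k ∈ TRACKED_FIELDS) && decide (v ≠ none) && decide (v ≠ some "")

-- '(k, new_data[k]) if k in new_data and _keep(k, new_data[k]) else (k, v)' for one existing entry
def pvRewrite (nd : PySem.Dict String (Option String)) (kv : String × Option String) : String × Option String :=
  match nd.get? kv.1 with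
  | some v => if pvKeep kv.1 v then (kv.1, v) else kv
  | none => kv

-- literal port of B: updated = in-place rewrite of existing; appended = fresh tracked entries; dict(updated + appended)
def merge_extracted_alt (existing : List (String × Option String)) (new_data : List (String × Option String)) : List (String × Option String) :=
  (PySem.Dict.ofList
    (existing.map (pvRewrite (PySem.Dict.ofList new_data))
     ++ new_data.filter (fun kv => pvKeep kv.1 kv.2 && !((PySem.Dict.ofList existing).contains kv.1)))).items

-- ===== PRECONDITION & SPEC =====
-- Pre_ excludes association lists with duplicate keys: they do not represent any Python dict
-- (a dict's item list always has distinct keys), so behaviour there is an artefact of the encoding.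
def Pre_merge_extracted (existing : List (String × Option String)) (new_data : List (String × Option String)) : Prop :=
  (existing.map Prod.fst).Nodup ∧ (new_data.map Prod.fst).Nodup
instance (existing : List (String × Option String)) (new_data : List (String × Option String)) : Decidable (Pre_merge_extracted existing new_data) := by unfold Pre_merge_extracted; infer_instance

def pvWitness_merge_extracted : (List (String × Option String)) × (List (String × Option String)) :=
  ([("consent_given", some "yes"), ("income", some "50k")],
   [("best_call_time", some "7pm"), ("consent_given", none), ("spending", some "x")])

def Spec_merge_extracted (existing : List (String × Option String)) (new_data : List (String × Option String)) (out : List (String × Option String)) : Prop := out = merge_extracted_alt existing new_data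
instance (existing : List (String × Option String)) (new_data : List (String × Option String)) (out : List (String × Option String)) : Decidable (Spec_merge_extracted existing new_data out) := by unfold Spec_merge_extracted; infer_instance

-- ===== CLAIM (what is proved, stated in full; the proofs are below) =====
def Claim_equal_merge_extracted : Prop := ∀ (existing : List (String × Option String)) (new_data : List (String × Option String)), Dom_merge_extracted existing new_data → Pre_merge_extracted existing new_data → Spec_merge_extracted existing new_data (merge_extracted existing new_data)

-- ===== LEMMAS AND PROOFS =====

-- the rewrite never changes the key of an entry
theorem pvRewrite_fst (nd : PySem.Dict String (Option String)) (kv : String × Option String) :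
    (pvRewrite nd kv).1 = kv.1 := by
  unfold pvRewrite
  cases h : nd.get? kv.1 with
  | none => rfl
  | some v => by_cases hk : pvKeep kv.1 v = true <;> simp [hk]

-- a key absent from the list looks up to none
theorem get?_mk_eq_none {L : List (String × Option String)} {x : String}
    (h : x ∉ L.map Prod.fst) : (PySem.Dict.mk L).get? x = none := by
  simp only [PySem.Dict.get?, Option.map_eq_none_iff, List.find?_eq_none]
  intro p hp
  simp only [beq_iff_eq]
  intro hpe
  exact h (hpe ▸ List.mem_map_of_mem hp)

-- A's two guards are the pvKeep test
theorem stepA_eq :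
    (fun (m : PySem.Dict String (Option String)) (kv : String × Option String) =>
      if kv.1 ∉ TRACKED_FIELDS then m
      else if kv.2 ≠ none ∧ kv.2 ≠ some "" then m.insert kv.1 kv.2
      else m)
    = (fun m kv => if pvKeep kv.1 kv.2 then m.insert kv.1 kv.2 else m) := by
  funext m kv
  by_cases h1 : kv.1 ∈ TRACKED_FIELDS <;> by_cases h2 : kv.2 = none <;>
    by_cases h3 : kv.2 = some "" <;> simp [pvKeep, h1, h2, h3]

-- dict() of an association list with distinct keys is that list
theorem items_ofList (l : List (String × Option String)) (h : (l.map Prod.fst).Nodup) :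
    (PySem.Dict.ofList l).items = l := by
  show (l.foldl (fun acc p => acc.insert p.1 p.2) PySem.Dict.empty).items = l
  rw [PySem.Dict.items_foldl_insert_fresh l Prod.fst Prod.snd PySem.Dict.empty
      (fun a _ => PySem.Dict.contains_empty _) h]
  simp [PySem.Dict.empty]

theorem ofList_eq_mk (l : List (String × Option String)) (h : (l.map Prod.fst).Nodup) :
    PySem.Dict.ofList l = PySem.Dict.mk l :=
  PySem.Dict.ext (items_ofList l h)

-- dropping the head of the lookup list does not change the rewrite of an entry with a different key
theorem pvRewrite_cons_of_ne {kv : String × Option String} {L' : List (String × Option String)}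
    {q : String × Option String} (h : q.1 ≠ kv.1) :
    pvRewrite (PySem.Dict.mk (kv :: L')) q = pvRewrite (PySem.Dict.mk L') q := by
  unfold pvRewrite
  rw [PySem.Dict.get?_mk_cons, beq_false_of_ne (Ne.symm h)]
  simp

-- a head entry that fails the keep test never influences any rewrite (keys in the list are distinct)
theorem pvRewrite_cons_of_keep_false {kv : String × Option String} {L' : List (String × Option String)}
    (h : pvKeep kv.1 kv.2 = false) (hk1 : kv.1 ∉ L'.map Prod.fst)
    (q : String × Option String) :
    pvRewrite (PySem.Dict.mk (kv :: L')) q = pvRewrite (PySem.Dict.mk L') q := by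
  by_cases he : q.1 = kv.1
  · unfold pvRewrite
    rw [PySem.Dict.get?_mk_cons, beq_iff_eq.mpr he.symm]
    rw [get?_mk_eq_none (he ▸ hk1)]
    have h' : pvKeep q.1 kv.2 = false := by rw [he]; exact h
    simp [h']
  · exact pvRewrite_cons_of_ne he

-- main loop invariant: A's insert loop over a table of distinct keys equals the positional rewrite plus the appendix
theorem loop_items (L : List (String × Option String)) (d : PySem.Dict String (Option String))
    (hd : d.keys.Nodup) (hL : (L.map Prod.fst).Nodup) :
    (L.foldl (fun m kv => if pvKeep kv.1 kv.2 then m.insert kv.1 kv.2 else m) d).items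
    = d.items.map (pvRewrite (PySem.Dict.mk L))
      ++ L.filter (fun kv => pvKeep kv.1 kv.2 && !(d.contains kv.1)) := by
  induction L generalizing d with
  | nil =>
    have h1 : d.items.map (pvRewrite (PySem.Dict.mk [])) = d.items.map id :=
      List.map_congr_left (fun p _ => rfl)
    simp [h1]
  | cons kv L' ih =>
    have hk1 : kv.1 ∉ L'.map Prod.fst := by
      have := hL; simp only [List.map_cons, List.nodup_cons] at this; exact this.1
    have hL' : (L'.map Prod.fst).Nodup := by
      have := hL; simp only [List.map_cons, List.nodup_cons] at this; exact this.2
    simp only [List.foldl_cons, List.filter_cons]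
    by_cases hk : pvKeep kv.1 kv.2 = true
    · rw [if_pos hk]
      rw [ih (d.insert kv.1 kv.2) (PySem.Dict.nodup_keys_insert d kv.1 kv.2 hd) hL']
      have hfilter : L'.filter (fun q => pvKeep q.1 q.2 && !((d.insert kv.1 kv.2).contains q.1))
          = L'.filter (fun q => pvKeep q.1 q.2 && !(d.contains q.1)) := by
        apply List.filter_congr
        intro q hq
        have hne : (q.1 == kv.1) = false := by
          apply beq_false_of_ne
          intro hqe
          exact hk1 (hqe ▸ List.mem_map_of_mem hq)
        rw [PySem.Dict.contains_insert, hne, Bool.false_or]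
      rw [hfilter]
      by_cases hc : d.contains kv.1 = true
      · rw [PySem.Dict.items_insert_of_contains d kv.2 hc, List.map_map]
        have hmap : ∀ p : String × Option String,
            ((pvRewrite (PySem.Dict.mk L')) ∘ (fun p => if (p.1 == kv.1) = true then (kv.1, kv.2) else p)) p
            = pvRewrite (PySem.Dict.mk (kv :: L')) p := by
          intro p
          by_cases he : p.1 = kv.1
          · have hb : (p.1 == kv.1) = true := beq_iff_eq.mpr he
            simp only [Function.comp_apply, hb, if_true]
            unfold pvRewrite
            rw [PySem.Dict.get?_mk_cons, beq_iff_eq.mpr he.symm]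
            rw [get?_mk_eq_none hk1]
            simp [he, hk]
          · have hb : (p.1 == kv.1) = false := beq_false_of_ne he
            simp only [Function.comp_apply, hb, Bool.false_eq_true, if_false]
            exact (pvRewrite_cons_of_ne he).symm
        rw [List.map_congr_left (fun p _ => hmap p)]
        have hdrop : (pvKeep kv.1 kv.2 && !(d.contains kv.1)) = false := by rw [hc]; simp
        rw [hdrop]
        simp
      · have hcf : d.contains kv.1 = false := by simpa using hc
        rw [PySem.Dict.items_insert_of_not_contains d kv.2 hcf, List.map_append]
        have hsingle : [(kv.1, kv.2)].map (pvRewrite (PySem.Dict.mk L')) = [kv] := by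
          simp [pvRewrite, get?_mk_eq_none hk1]
        have hmap : d.items.map (pvRewrite (PySem.Dict.mk L'))
            = d.items.map (pvRewrite (PySem.Dict.mk (kv :: L'))) := by
          apply List.map_congr_left
          intro p hp
          have hne : p.1 ≠ kv.1 := by
            intro hpe
            have hct : d.contains kv.1 = true := by
              simp only [PySem.Dict.contains, List.any_eq_true]
              exact ⟨p, hp, beq_iff_eq.mpr hpe⟩
            rw [hcf] at hct; exact absurd hct (by simp)
          exact (pvRewrite_cons_of_ne hne).symm
        rw [hsingle, hmap]
        have hkeep : (pvKeep kv.1 kv.2 && !(d.contains kv.1)) = true := by rw [hk, hcf]; simp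
        rw [hkeep]
        simp
    · have hkf : pvKeep kv.1 kv.2 = false := by simpa using hk
      rw [if_neg (by simp [hkf])]
      rw [ih d hd hL']
      rw [List.map_congr_left (fun q _ => (pvRewrite_cons_of_keep_false hkf hk1 q).symm)]
      have hdrop : (pvKeep kv.1 kv.2 && !(d.contains kv.1)) = false := by rw [hkf]; simp
      rw [hdrop]
      simp

-- ===== VERDICT (by name: the statement is the Claim_ definition above) =====
theorem merge_extracted_spec : Claim_equal_merge_extracted := by
  intro existing new_data _ hPre
  obtain ⟨he, hn⟩ := hPre
  show merge_extracted existing new_data = merge_extracted_alt existing new_data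
  unfold merge_extracted merge_extracted_alt
  rw [stepA_eq,
      loop_items new_data (PySem.Dict.ofList existing) (PySem.Dict.nodup_keys_ofList existing) hn,
      items_ofList existing he, ofList_eq_mk new_data hn]
  -- nodup keys of updated ++ appended, then dict() of it is itself
  have hup : (existing.map (pvRewrite (PySem.Dict.mk new_data))).map Prod.fst = existing.map Prod.fst := by
    rw [List.map_map]
    exact List.map_congr_left (fun p _ => pvRewrite_fst _ p)
  have happ : ((new_data.filter (fun kv => pvKeep kv.1 kv.2 && !((PySem.Dict.ofList existing).contains kv.1))).map Prod.fst).Nodup :=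
    hn.sublist (List.Sublist.map Prod.fst List.filter_sublist)
  have hdisj : List.Disjoint ((existing.map (pvRewrite (PySem.Dict.mk new_data))).map Prod.fst)
      ((new_data.filter (fun kv => pvKeep kv.1 kv.2 && !((PySem.Dict.ofList existing).contains kv.1))).map Prod.fst) := by
    rw [hup]
    intro a hae haf
    obtain ⟨q, hq, rfl⟩ := List.mem_map.mp haf
    have hpq := List.of_mem_filter hq
    have hcont : (PySem.Dict.ofList existing).contains q.1 = true := by
      simp only [PySem.Dict.contains, List.any_eq_true]
      rw [items_ofList existing he]
      obtain ⟨p, hp, hpe⟩ := List.mem_map.mp hae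
      exact ⟨p, hp, beq_iff_eq.mpr hpe⟩
    rw [hcont] at hpq
    simp at hpq
  have hnodup : (((existing.map (pvRewrite (PySem.Dict.mk new_data)))
      ++ new_data.filter (fun kv => pvKeep kv.1 kv.2 && !((PySem.Dict.ofList existing).contains kv.1))).map Prod.fst).Nodup := by
    rw [List.map_append]
    exact List.Nodup.append (hup ▸ he) happ hdisj
  exact (items_ofList _ hnodup).symm
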